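-- pv_equiv track=rewrite | github.com/sharathkumar49/learning | Python programs/pythonPrograms/smart_traffic_light_control.py | min_green_cycles
-- ===== SOURCE A (Python) =====
-- def min_green_cycles(arrival_times, green_duration):
--     arrival_times.sort()  # Sort the arrival times
--     cycles = 0
--     i = 0
--
--     while i < len(arrival_times):
--         cycles += 1
--         cycle_start = arrival_times[i]
--         cycle_end = cycle_start + green_duration
--
--         # Count how many cars can pass in this cycle
--         while i < len(arrival_times) and arrival_times[i] < cycle_end:
--             i += 1
--
--     return cycles
-- ===== SOURCE B (Python) =====
-- def min_green_cycles(arrival_times, green_duration):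
--     arrival_times.sort()
--     pending = arrival_times
--     cycles = 0
--     while pending:
--         cutoff = pending[0] + green_duration
--         pending = [t for t in pending if t >= cutoff]
--         cycles += 1
--     return cycles
-- ===== Notes on version B (the rewrite author's own statement) =====
-- stated objective: alternative
-- what changed: Replaces A's nested index-based while loops over one array by staged passes that repeatedly rebuild the pending list with a filter (one full filter pass per green cycle), with no index variable at all.
import Mathlib
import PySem

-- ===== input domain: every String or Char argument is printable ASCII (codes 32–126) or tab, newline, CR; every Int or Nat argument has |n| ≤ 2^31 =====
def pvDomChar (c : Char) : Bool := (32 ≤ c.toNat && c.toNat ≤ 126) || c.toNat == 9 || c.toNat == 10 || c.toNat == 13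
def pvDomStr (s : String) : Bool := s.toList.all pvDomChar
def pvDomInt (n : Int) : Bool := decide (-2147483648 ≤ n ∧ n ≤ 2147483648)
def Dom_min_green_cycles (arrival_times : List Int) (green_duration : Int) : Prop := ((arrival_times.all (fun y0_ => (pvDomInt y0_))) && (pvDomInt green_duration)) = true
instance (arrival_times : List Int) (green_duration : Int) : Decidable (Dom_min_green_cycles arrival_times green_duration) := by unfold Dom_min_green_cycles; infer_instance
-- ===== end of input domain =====

-- B replaces A's nested index-based while loops by staged filter passes that rebuild the
-- pending list once per cycle (objective: alternative). Both Pythons sort the argument list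
-- in place; the theorems are about the return value, the mutation is identical in A and B.

-- ===== PORT A =====
-- inner while loop: advance i while i < len and arrival_times[i] < cycle_end
def pvInnerA (xs : List Int) (ce : Int) (i : Nat) : Nat :=
  if i < xs.length ∧ xs.getD i 0 < ce then pvInnerA xs ce (i + 1) else i
termination_by xs.length - i
decreasing_by omega

-- outer while loop, with fuel making it total (the Python diverges when green_duration ≤ 0
-- on a nonempty list; there the fuel runs out and both ports agree all the same)
def pvOuterA (xs : List Int) (gd : Int) : Nat → Nat → Int → Int
  | 0, _, cycles => cycles
  | fuel + 1, i, cycles =>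
    if i < xs.length then
      let cycle_start := xs.getD i 0
      let cycle_end := cycle_start + gd
      pvOuterA xs gd fuel (pvInnerA xs cycle_end i) (cycles + 1)
    else cycles

def min_green_cycles (arrival_times : List Int) (green_duration : Int) : Int :=
  let s := PySem.List.sorted arrival_times (fun t => t)
  pvOuterA s green_duration (s.length + 1) 0 0

-- ===== PORT B =====
-- B's while loop over the shrinking pending list; fuel for the same divergent inputs as A's
def pvLoopB (gd : Int) : Nat → List Int → Int → Int
  | 0, _, cycles => cycles
  | fuel + 1, pending, cycles =>
    match pending with
    | [] => cycles
    | t0 :: _ =>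
      pvLoopB gd fuel (pending.filter (fun t => t0 + gd ≤ t)) (cycles + 1)

def min_green_cycles_alt (arrival_times : List Int) (green_duration : Int) : Int :=
  let s := PySem.List.sorted arrival_times (fun t => t)
  pvLoopB green_duration (s.length + 1) s 0

-- ===== PRECONDITION & SPEC =====
def Spec_min_green_cycles (arrival_times : List Int) (green_duration : Int) (out : Int) : Prop := out = min_green_cycles_alt arrival_times green_duration
instance (arrival_times : List Int) (green_duration : Int) (out : Int) : Decidable (Spec_min_green_cycles arrival_times green_duration out) := by unfold Spec_min_green_cycles; infer_instance

-- ===== CLAIM (what is proved, stated in full; the proofs are below) =====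
def Claim_equal_min_green_cycles : Prop := ∀ (arrival_times : List Int) (green_duration : Int), Dom_min_green_cycles arrival_times green_duration → Spec_min_green_cycles arrival_times green_duration (min_green_cycles arrival_times green_duration)

-- ===== LEMMAS AND PROOFS =====

lemma pvInnerA_ge (xs : List Int) (ce : Int) (i : Nat) : i ≤ pvInnerA xs ce i := by
  rw [pvInnerA]
  split
  · exact le_trans (Nat.le_succ i) (pvInnerA_ge xs ce (i + 1))
  · exact le_refl i
termination_by xs.length - i
decreasing_by omega

-- on a ≤-sorted list, filtering by "≥ ce" from position i is dropping up to the inner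
-- loop's stop index
lemma pvFilter_eq_drop (xs : List Int) (ce : Int) (i : Nat)
    (hs : xs.Pairwise (· ≤ ·)) :
    (xs.drop i).filter (fun t => ce ≤ t) = xs.drop (pvInnerA xs ce i) := by
  rw [pvInnerA]
  split
  · rename_i h
    have hd : xs.drop i = xs[i] :: xs.drop (i + 1) := List.drop_eq_getElem_cons h.1
    have hv : xs.getD i 0 = xs[i] := List.getD_eq_getElem xs 0 h.1
    rw [hd, List.filter_cons]
    have : ¬ ce ≤ xs[i] := by omega
    simp only [this, decide_false, Bool.false_eq_true, if_false]
    exact pvFilter_eq_drop xs ce (i + 1) hs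
  · rename_i h
    by_cases hi : i < xs.length
    · have hd : xs.drop i = xs[i] :: xs.drop (i + 1) := List.drop_eq_getElem_cons hi
      have hv : xs.getD i 0 = xs[i] := List.getD_eq_getElem xs 0 hi
      have hge : ce ≤ xs[i] := by
        by_contra hlt
        exact h ⟨hi, by omega⟩
      have hp : (xs.drop i).Pairwise (· ≤ ·) := hs.sublist (List.drop_sublist i xs)
      rw [hd] at hp ⊢
      rw [List.filter_cons]
      have hall : ∀ y ∈ xs.drop (i + 1), xs[i] ≤ y := (List.pairwise_cons.mp hp).1
      simp only [hge, decide_true, if_true]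
      congr 1
      apply List.filter_eq_self.mpr
      intro y hy
      simpa using le_trans hge (hall y hy)
    · rw [List.drop_eq_nil_of_le (by omega)]
      simp
termination_by xs.length - i
decreasing_by omega

-- the two loops run in lockstep: same fuel, A at index i ↔ B on the suffix xs.drop i
lemma pvLockstep (xs : List Int) (gd : Int) (hs : xs.Pairwise (· ≤ ·)) :
    ∀ (fuel : Nat) (i : Nat) (c : Int),
      pvOuterA xs gd fuel i c = pvLoopB gd fuel (xs.drop i) c := by
  intro fuel
  induction fuel with
  | zero => intro i c; rfl
  | succ fuel ih =>
    intro i c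
    rw [pvOuterA, pvLoopB.eq_def]
    by_cases hi : i < xs.length
    · have hd : xs.drop i = xs[i] :: xs.drop (i + 1) := List.drop_eq_getElem_cons hi
      have hv : xs.getD i 0 = xs[i] := List.getD_eq_getElem xs 0 hi
      rw [if_pos hi, hd]
      have hfe : (xs[i] :: xs.drop (i + 1)).filter (fun t => decide (xs[i] + gd ≤ t))
          = xs.drop (pvInnerA xs (xs.getD i 0 + gd) i) := by
        rw [← hd, ← hv]
        exact pvFilter_eq_drop xs (xs.getD i 0 + gd) i hs
      simp only [hfe]
      exact ih (pvInnerA xs (xs.getD i 0 + gd) i) (c + 1)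
    · rw [if_neg hi, List.drop_eq_nil_of_le (by omega)]
  
-- ===== VERDICT (by name: the statement is the Claim_ definition above) =====
theorem min_green_cycles_spec : Claim_equal_min_green_cycles := by
  intro xs gd _
  unfold Spec_min_green_cycles min_green_cycles min_green_cycles_alt
  simpa using pvLockstep (PySem.List.sorted xs (fun t => t)) gd
    (PySem.List.sorted_pairwise xs (fun t => t)) ((PySem.List.sorted xs (fun t => t)).length + 1) 0 0
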